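-- pv_equiv track=rewrite | github.com/Subodh88/3M_Korea | Scenario_Code.py | divide_into_bins
-- ===== SOURCE A (Python) =====
-- def divide_into_bins(total: int, num_bins: int):
-- 	if total <= 0 or num_bins <= 0:
-- 		raise ValueError("Both total and num_bins must be positive integers")
-- 	if num_bins > total:
-- 		raise ValueError("Number of bins cannot exceed total")
--
-- 	base_size = total // num_bins
-- 	remainder = total % num_bins
--
-- 	bins = []
-- 	start = 1
--
-- 	for i in range(1, num_bins + 1):
-- 		# Distribute remainder across the first few bins
-- 		extra = 1 if i <= remainder else 0
-- 		end = start + base_size + extra - 1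
-- 		bins.append((start, end))
-- 		start = end + 1
--
-- 	return bins
-- ===== SOURCE B (Python) =====
-- def divide_into_bins(total: int, num_bins: int):
-- 	if total <= 0 or num_bins <= 0:
-- 		raise ValueError("Both total and num_bins must be positive integers")
-- 	if num_bins > total:
-- 		raise ValueError("Number of bins cannot exceed total")
-- 	base, rem = divmod(total, num_bins)
-- 	return [(1 + i * base + min(i, rem), (i + 1) * base + min(i + 1, rem))
-- 	        for i in range(num_bins)]
-- ===== Notes on version B (the rewrite author's own statement) =====
-- stated objective: alternative
-- what changed: Each bin's (start, end) is computed independently by a closed-form formula 1+i*base+min(i,rem) from its index, replacing A's sequential loop that threads a running start accumulator bin to bin.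
import Mathlib
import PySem

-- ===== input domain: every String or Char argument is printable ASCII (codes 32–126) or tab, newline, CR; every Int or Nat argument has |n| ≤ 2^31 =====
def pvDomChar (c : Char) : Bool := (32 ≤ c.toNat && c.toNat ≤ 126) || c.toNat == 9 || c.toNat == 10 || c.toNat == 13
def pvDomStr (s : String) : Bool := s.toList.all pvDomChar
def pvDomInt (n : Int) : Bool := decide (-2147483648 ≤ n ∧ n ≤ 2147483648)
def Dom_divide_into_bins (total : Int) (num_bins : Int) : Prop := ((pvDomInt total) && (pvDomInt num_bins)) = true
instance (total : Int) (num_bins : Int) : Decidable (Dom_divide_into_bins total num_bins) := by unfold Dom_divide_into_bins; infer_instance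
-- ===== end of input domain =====

-- B computes each bin independently from its index with a closed-form min() offset,
-- replacing A's loop that threads a running start accumulator (alternative decomposition, same cost).


-- ===== PORT A =====
def divide_into_bins (total : Int) (num_bins : Int) : List (Int × Int) :=
  if total ≤ 0 ∨ num_bins ≤ 0 then []  -- Python raises ValueError here; excluded by Pre_
  else if num_bins > total then []      -- Python raises ValueError here; excluded by Pre_
  else
    let base_size := PySem.Int.floordiv total num_bins
    let remainder := PySem.Int.mod total num_bins
    let res := (PySem.List.pyRange 1 (num_bins + 1) 1).foldl
      (fun (st : List (Int × Int) × Int) i =>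
        let extra : Int := if i ≤ remainder then 1 else 0
        let e := st.2 + base_size + extra - 1
        (st.1 ++ [(st.2, e)], e + 1)) ([], 1)
    res.1

-- ===== PORT B =====
def divide_into_bins_alt (total : Int) (num_bins : Int) : List (Int × Int) :=
  if total ≤ 0 ∨ num_bins ≤ 0 then []  -- Python raises ValueError here; excluded by Pre_
  else if num_bins > total then []      -- Python raises ValueError here; excluded by Pre_
  else
    let base := PySem.Int.floordiv total num_bins
    let rem := PySem.Int.mod total num_bins
    (PySem.List.pyRange 0 num_bins 1).map
      (fun i => (1 + i * base + min i rem, (i + 1) * base + min (i + 1) rem))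

-- ===== PRECONDITION & SPEC =====
-- Pre_ excludes exactly the inputs on which A raises ValueError (non-positive total/num_bins, or num_bins > total).
def Pre_divide_into_bins (total : Int) (num_bins : Int) : Prop :=
  0 < total ∧ 0 < num_bins ∧ num_bins ≤ total
instance (total : Int) (num_bins : Int) : Decidable (Pre_divide_into_bins total num_bins) := by unfold Pre_divide_into_bins; infer_instance
def pvWitness_divide_into_bins : Int × Int := (7, 3)

def Spec_divide_into_bins (total : Int) (num_bins : Int) (out : List (Int × Int)) : Prop := out = divide_into_bins_alt total num_bins
instance (total : Int) (num_bins : Int) (out : List (Int × Int)) : Decidable (Spec_divide_into_bins total num_bins out) := by unfold Spec_divide_into_bins; infer_instance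

-- ===== CLAIM (what is proved, stated in full; the proofs are below) =====
def Claim_equal_divide_into_bins : Prop := ∀ (total : Int) (num_bins : Int), Dom_divide_into_bins total num_bins → Pre_divide_into_bins total num_bins → Spec_divide_into_bins total num_bins (divide_into_bins total num_bins)

-- ===== LEMMAS AND PROOFS =====

-- A's loop from index k+1 with running start 1 + k*base + min k rem equals B's closed-form map from k.
lemma divide_loop_eq (base rem n : Int) :
    ∀ (m : Nat) (k : Int) (acc : List (Int × Int)), 0 ≤ k → k ≤ n → (n - k).toNat = m →
    ((PySem.List.pyRange (k + 1) (n + 1) 1).foldl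
      (fun (st : List (Int × Int) × Int) i =>
        let extra : Int := if i ≤ rem then 1 else 0
        let e := st.2 + base + extra - 1
        (st.1 ++ [(st.2, e)], e + 1)) (acc, 1 + k * base + min k rem)).1
    = acc ++ (PySem.List.pyRange k n 1).map
        (fun i => (1 + i * base + min i rem, (i + 1) * base + min (i + 1) rem)) := by
  intro m
  induction m with
  | zero =>
    intro k acc hk hkn hm
    simp [PySem.List.pyRange_one_eq_nil (by omega : n + 1 ≤ k + 1),
          PySem.List.pyRange_one_eq_nil (by omega : n ≤ k)]
  | succ m ih =>
    intro k acc hk hkn hm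
    have hlt : k < n := by omega
    rw [PySem.List.pyRange_one_cons (by omega : k + 1 < n + 1),
        PySem.List.pyRange_one_cons hlt]
    simp only [List.foldl_cons, List.map_cons]
    have hmin : min k rem + (if k + 1 ≤ rem then (1 : Int) else 0) = min (k + 1) rem := by
      split_ifs <;> omega
    have hend : 1 + k * base + min k rem + base + (if k + 1 ≤ rem then (1 : Int) else 0) - 1
        = (k + 1) * base + min (k + 1) rem := by
      rw [← hmin]; ring
    have hstart : (k + 1) * base + min (k + 1) rem + 1 = 1 + (k + 1) * base + min (k + 1) rem := by
      ring
    simp only [hend, hstart]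
    rw [ih (k + 1) (acc ++ [(1 + k * base + min k rem, (k + 1) * base + min (k + 1) rem)])
        (by omega) (by omega) (by omega)]
    simp

-- ===== VERDICT (by name: the statement is the Claim_ definition above) =====
theorem divide_into_bins_spec : Claim_equal_divide_into_bins := by
  intro total num_bins _ hPre
  obtain ⟨ht, hn, hle⟩ := hPre
  unfold Spec_divide_into_bins divide_into_bins divide_into_bins_alt
  rw [if_neg (by omega), if_neg (by omega), if_neg (by omega), if_neg (by omega)]
  have hrem : 0 ≤ PySem.Int.mod total num_bins := PySem.Int.mod_nonneg total hn
  have h1 : (([], (1 : Int)) : List (Int × Int) × Int)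
      = ([], 1 + 0 * PySem.Int.floordiv total num_bins + min 0 (PySem.Int.mod total num_bins)) := by
    rw [min_eq_left hrem]; norm_num
  simp only []
  rw [h1]
  simpa using divide_loop_eq (PySem.Int.floordiv total num_bins) (PySem.Int.mod total num_bins)
    num_bins num_bins.toNat 0 [] (le_refl 0) (by omega) (by omega)
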